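-- pv_equiv track=rewrite | github.com/TakuKitamura/ttool-fstar | MPSoC/soclib/soclib/iss/arm/decoder/op_decoder/packer.py | bitlist_to_slices
-- ===== SOURCE A (Python) =====
-- def bitlist_to_slices(bitlist):
-- 	slices = []
-- 	bitlist = list(sorted(bitlist))
-- 	while bitlist:
-- 		b = bitlist.pop()
-- 		l, r = b, b
-- 		while bitlist and bitlist[-1] == r-1:
-- 			r = bitlist.pop()
-- 		slices.append((l,r))
-- 	return slices
-- ===== SOURCE B (Python) =====
-- def bitlist_to_slices(bitlist):
--     slices = []
--     for v in sorted(bitlist):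
--         if slices and slices[-1][0] == v - 1:
--             slices[-1] = (v, slices[-1][1])
--         else:
--             slices.append((v, v))
--     return slices[::-1]
-- ===== Notes on version B (the rewrite author's own statement) =====
-- stated objective: simpler
-- what changed: A pops repeatedly from the top of the sorted list with a nested while loop per slice; B makes one forward pass over the sorted list, extending or appending the current slice, and reverses the slice list once at the end.
import Mathlib
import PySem

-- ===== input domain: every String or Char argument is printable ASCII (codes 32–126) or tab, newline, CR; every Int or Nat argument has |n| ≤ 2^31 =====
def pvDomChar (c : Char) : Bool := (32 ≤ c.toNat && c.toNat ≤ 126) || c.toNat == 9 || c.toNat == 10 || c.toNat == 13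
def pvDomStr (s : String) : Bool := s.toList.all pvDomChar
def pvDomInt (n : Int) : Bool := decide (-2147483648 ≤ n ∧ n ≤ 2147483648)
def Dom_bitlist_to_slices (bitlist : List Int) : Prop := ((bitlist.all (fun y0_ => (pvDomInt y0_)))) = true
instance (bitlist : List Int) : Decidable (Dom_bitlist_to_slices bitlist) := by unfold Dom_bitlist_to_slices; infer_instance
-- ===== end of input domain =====

-- B replaces A's pop-from-the-top nested while loops by a single forward pass over the
-- sorted list that extends or opens the front slice (objective: simpler, same cost).

-- ===== PORT A =====
-- inner `while bitlist and bitlist[-1] == r-1: r = bitlist.pop()`; popping from the END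
-- of the ascending list is modelled as taking the HEAD of the reversed (descending) list.
def innerA (r : Int) : List Int → Int × List Int
  | [] => (r, [])
  | x :: xs => if x = r - 1 then innerA x xs else (r, x :: xs)

theorem innerA_len (r : Int) (xs : List Int) : (innerA r xs).2.length ≤ xs.length := by
  induction xs generalizing r with
  | nil => simp [innerA]
  | cons x xs ih =>
    simp only [innerA]
    split
    · exact Nat.le_trans (ih x) (Nat.le_succ _)
    · simp

-- outer `while bitlist:` with the accumulating `slices.append((l,r))`
def outerA : List Int → List (Int × Int) → List (Int × Int)
  | [], slices => slices
  | b :: rest, slices => outerA (innerA b rest).2 (slices ++ [(b, (innerA b rest).1)])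
termination_by d _ => d.length
decreasing_by exact Nat.lt_succ_of_le (innerA_len b rest)

def bitlist_to_slices (bitlist : List Int) : List (Int × Int) :=
  outerA ((PySem.List.sorted bitlist (fun x => x) false).reverse) []

-- ===== PORT B =====
-- one step of B's loop body: extend the last slice in place or append a new one
def bstep (slices : List (Int × Int)) (v : Int) : List (Int × Int) :=
  match slices.getLast? with
  | some (m, f) => if m = v - 1 then slices.dropLast ++ [(v, f)] else slices ++ [(v, v)]
  | none => [(v, v)]

def bitlist_to_slices_alt (bitlist : List Int) : List (Int × Int) :=
  ((PySem.List.sorted bitlist (fun x => x) false).foldl bstep []).reverse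

-- ===== PRECONDITION & SPEC =====
def Spec_bitlist_to_slices (bitlist : List Int) (out : List (Int × Int)) : Prop := out = bitlist_to_slices_alt bitlist
instance (bitlist : List Int) (out : List (Int × Int)) : Decidable (Spec_bitlist_to_slices bitlist out) := by unfold Spec_bitlist_to_slices; infer_instance

-- ===== CLAIM (what is proved, stated in full; the proofs are below) =====
def Claim_equal_bitlist_to_slices : Prop := ∀ (bitlist : List Int), Dom_bitlist_to_slices bitlist → Spec_bitlist_to_slices bitlist (bitlist_to_slices bitlist)

-- ===== LEMMAS AND PROOFS =====

-- front-of-list mirror of bstep, used only to relate the two ports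
def frontStep (slices : List (Int × Int)) (v : Int) : List (Int × Int) :=
  match slices with
  | (m, f) :: rest => if m = v - 1 then (v, f) :: rest else (v, v) :: (m, f) :: rest
  | [] => [(v, v)]

theorem bstep_rev (s : List (Int × Int)) (v : Int) :
    bstep s v = (frontStep s.reverse v).reverse := by
  cases h : s.reverse with
  | nil => simp at h; simp [h, bstep, frontStep]
  | cons p t =>
    obtain ⟨m, f⟩ := p
    have hs : s = t.reverse ++ [(m, f)] := by
      have := congrArg List.reverse h; simpa using this
    subst hs
    simp [bstep, frontStep]
    split <;> simp

theorem foldl_bstep_rev (l : List Int) : ∀ (acc : List (Int × Int)),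
    l.foldl bstep acc = (l.foldl frontStep acc.reverse).reverse := by
  induction l with
  | nil => simp
  | cons v l ih =>
    intro acc
    simp only [List.foldl_cons]
    rw [ih, bstep_rev, List.reverse_reverse]

-- accumulator-free form of A's outer loop
def fA : List Int → List (Int × Int)
  | [] => []
  | b :: rest => (b, (innerA b rest).1) :: fA (innerA b rest).2
termination_by d => d.length
decreasing_by exact Nat.lt_succ_of_le (innerA_len b rest)

theorem outerA_eq (d : List Int) (acc : List (Int × Int)) : outerA d acc = acc ++ fA d := by
  induction d, acc using outerA.induct with
  | case1 acc => simp [outerA, fA]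
  | case2 b rest acc ih => rw [outerA, fA, ih]; simp

theorem fA_cons (b : Int) (rest : List Int) : fA (b :: rest) = frontStep (fA rest) b := by
  cases rest with
  | nil => simp [fA, innerA, frontStep]
  | cons x xs =>
    by_cases h : x = b - 1
    · rw [fA, fA]
      simp [innerA, h, frontStep]
    · rw [fA]
      simp [innerA, h, frontStep, fA]

theorem fA_foldr (d : List Int) : fA d = d.foldr (fun b acc => frontStep acc b) [] := by
  induction d with
  | nil => simp [fA]
  | cons b rest ih => rw [fA_cons, ih]; rfl

-- ===== VERDICT (by name: the statement is the Claim_ definition above) =====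
theorem bitlist_to_slices_spec : Claim_equal_bitlist_to_slices := by
  intro bitlist _
  unfold Spec_bitlist_to_slices bitlist_to_slices bitlist_to_slices_alt
  rw [outerA_eq, fA_foldr, List.foldr_reverse, foldl_bstep_rev]
  simp
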